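-- pv_equiv track=rewrite | github.com/ngocbao0201/PYTHON-2024 | PY01043.py | check
-- ===== SOURCE A (Python) =====
-- l = ['0','2','4','6','8']
--
-- def check(n) :
--     m = str(n)[::-1]
--     if str(n) != m :
--         return False
--     else :
--         if len(str(n)) % 2 == 1 :
--             return False
--         for i in str(n) :
--             if i not in l :
--                 return False
--         return True
-- ===== SOURCE B (Python) =====
-- def check(n):
--     s = str(n)
--     if len(s) % 2 == 1:
--         return False
--     for i in range(len(s) // 2):
--         if s[i] != s[len(s) - 1 - i] or s[i] not in '02468':
--             return False
--     return True
-- ===== Notes on version B (the rewrite author's own statement) =====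
-- stated objective: alternative
-- what changed: Replaces A's full-string reversal comparison plus a separate full digit-membership scan with an even-length guard followed by a single half-length two-pointer loop that checks the palindrome condition and even-digit membership together.
import Mathlib
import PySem

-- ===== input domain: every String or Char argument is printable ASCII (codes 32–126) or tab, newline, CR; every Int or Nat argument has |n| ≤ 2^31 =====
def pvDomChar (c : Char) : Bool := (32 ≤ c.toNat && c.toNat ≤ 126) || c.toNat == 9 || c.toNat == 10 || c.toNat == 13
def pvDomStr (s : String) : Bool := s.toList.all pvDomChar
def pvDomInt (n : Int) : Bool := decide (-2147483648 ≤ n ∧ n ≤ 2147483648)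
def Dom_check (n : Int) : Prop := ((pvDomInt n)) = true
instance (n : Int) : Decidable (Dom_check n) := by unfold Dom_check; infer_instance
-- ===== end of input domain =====

-- B folds A's reversal-compare plus separate full digit scan into one half-length
-- two-pointer pass (different decomposition; no speed claim).

-- ===== PORT A =====
-- l = ['0','2','4','6','8']
def checkEvens : List Char := ['0', '2', '4', '6', '8']

-- the 'for i in str(n)' loop with its early return
def checkDigitLoop : List Char → Bool
  | [] => true
  | c :: cs => if ¬ (c ∈ checkEvens) then false else checkDigitLoop cs

def check (n : Int) : Bool :=
  let s := PySem.Int.toChars n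
  match PySem.List.slice? s none none (-1) with
  | none => false   -- unreachable: step -1 never raises
  | some m =>
    if s ≠ m then false
    else if s.length % 2 == 1 then false
    else checkDigitLoop s

-- ===== PORT B =====
-- the 'for i in range(len(s)//2)' loop with its early return
def checkAltLoop (s : List Char) : List Int → Bool
  | [] => true
  | i :: rest =>
    if PySem.List.pyGetD s i ' ' ≠ PySem.List.pyGetD s ((s.length : Int) - 1 - i) ' '
        ∨ ¬ (PySem.List.pyGetD s i ' ' ∈ "02468".toList) then false
    else checkAltLoop s rest

def check_alt (n : Int) : Bool :=
  let s := PySem.Int.toChars n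
  if s.length % 2 == 1 then false
  else checkAltLoop s (PySem.List.pyRange 0 ((s.length : Int) / 2) 1)

-- ===== PRECONDITION & SPEC =====
def Spec_check (n : Int) (out : Bool) : Prop := out = check_alt n
instance (n : Int) (out : Bool) : Decidable (Spec_check n out) := by unfold Spec_check; infer_instance

-- ===== CLAIM (what is proved, stated in full; the proofs are below) =====
def Claim_equal_check : Prop := ∀ (n : Int), Dom_check n → Spec_check n (check n)

-- ===== LEMMAS AND PROOFS =====

theorem checkDigitLoop_eq_all (s : List Char) :
    checkDigitLoop s = s.all (fun c => decide (c ∈ checkEvens)) := by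
  induction s with
  | nil => rfl
  | cons c cs ih =>
    simp only [checkDigitLoop, List.all_cons, ih]
    by_cases h : c ∈ checkEvens
    · simp [h]
    · simp [h]

theorem checkAltLoop_eq_all (s : List Char) (l : List Int) :
    checkAltLoop s l = l.all (fun i =>
      decide (PySem.List.pyGetD s i ' ' = PySem.List.pyGetD s ((s.length : Int) - 1 - i) ' '
        ∧ PySem.List.pyGetD s i ' ' ∈ "02468".toList)) := by
  induction l with
  | nil => rfl
  | cons i rest ih =>
    simp only [checkAltLoop, List.all_cons, ih]
    by_cases h : PySem.List.pyGetD s i ' ' ≠ PySem.List.pyGetD s ((s.length : Int) - 1 - i) ' '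
        ∨ ¬ (PySem.List.pyGetD s i ' ' ∈ "02468".toList)
    · rw [if_pos h]
      have hf : ¬ (PySem.List.pyGetD s i ' ' = PySem.List.pyGetD s ((s.length : Int) - 1 - i) ' '
          ∧ PySem.List.pyGetD s i ' ' ∈ "02468".toList) := by tauto
      rw [decide_eq_false hf, Bool.false_and]
    · rw [if_neg h]
      have ht : PySem.List.pyGetD s i ' ' = PySem.List.pyGetD s ((s.length : Int) - 1 - i) ' '
          ∧ PySem.List.pyGetD s i ' ' ∈ "02468".toList := by tauto
      rw [decide_eq_true ht, Bool.true_and]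

theorem reverse_eq_iff_mirror (s : List Char) :
    s.reverse = s ↔ ∀ i (h : i < s.length), s[i] = s[s.length - 1 - i]'(by omega) := by
  constructor
  · intro hp i h
    have h' : i < s.reverse.length := by simpa
    have h2 : s.reverse[i]'h' = s[i]'h := by simp only [hp]
    rw [← h2, List.getElem_reverse]
  · intro h
    apply List.ext_getElem (by simp)
    intro i h1 h2
    rw [List.getElem_reverse]
    exact (h i h2).symm

-- the core combinatorial fact: for even length, full palindrome + full even-digit scan
-- equals the half-length combined check
theorem half_check_iff (s : List Char) (hev : s.length % 2 = 0) :
    (s.reverse = s ∧ ∀ c ∈ s, c ∈ checkEvens) ↔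
    (∀ k (hk : k < s.length / 2), s[k]'(by omega) = s[s.length - 1 - k]'(by omega)
        ∧ s[k]'(by omega) ∈ checkEvens) := by
  constructor
  · rintro ⟨hp, hall⟩ k hk
    exact ⟨(reverse_eq_iff_mirror s).mp hp k (by omega),
      hall _ (List.getElem_mem (by omega))⟩
  · intro h
    have hmir : ∀ i (h : i < s.length), s[i] = s[s.length - 1 - i]'(by omega) := by
      intro i hi
      by_cases hil : i < s.length / 2
      · exact (h i hil).1
      · rcases Nat.eq_zero_or_pos s.length with h0 | h0
        · omega
        · have hj : s.length - 1 - i < s.length / 2 := by omega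
          have := (h _ hj).1
          have hji : s.length - 1 - (s.length - 1 - i) = i := by omega
          simp only [hji] at this
          exact this.symm
    refine ⟨(reverse_eq_iff_mirror s).mpr hmir, ?_⟩
    intro c hc
    obtain ⟨i, hi, rfl⟩ := List.mem_iff_getElem.mp hc
    by_cases hil : i < s.length / 2
    · exact (h i hil).2
    · have hj : s.length - 1 - i < s.length / 2 := by omega
      have hji : s.length - 1 - (s.length - 1 - i) = i := by omega
      have := (h _ hj).1
      simp only [hji] at this
      rw [← this]
      exact (h _ hj).2

theorem check_eq_check_alt (n : Int) : check n = check_alt n := by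
  simp only [check, check_alt, PySem.List.slice?_none_none_neg_one]
  set s := PySem.Int.toChars n with hs
  by_cases hodd : s.length % 2 = 1
  · have h1 : (s.length % 2 == 1) = true := by simp [hodd]
    simp [h1]
  · have hev : s.length % 2 = 0 := by omega
    have h1 : (s.length % 2 == 1) = false := by simp [hev]
    simp only [h1, Bool.false_eq_true, if_false, ne_eq, ite_not]
    rw [checkDigitLoop_eq_all, checkAltLoop_eq_all]
    rw [Bool.eq_iff_iff]
    have hhalf : ((s.length : Int) / 2) = ((s.length / 2 : Nat) : Int) := by omega
    rw [hhalf, PySem.List.pyRange_zero_natCast]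
    constructor
    · intro hA
      split_ifs at hA with hrev
      · rw [List.all_eq_true] at hA
        have := (half_check_iff s hev).mp ⟨hrev.symm, fun c hc => by simpa using hA c hc⟩
        rw [List.all_eq_true]
        intro x hx
        rw [List.mem_map] at hx
        obtain ⟨k, hk, rfl⟩ := hx
        rw [List.mem_range] at hk
        obtain ⟨hm, he⟩ := this k hk
        have e1 : PySem.List.pyGetD s ((k : Nat) : Int) ' ' = s[k]'(by omega) := by
          rw [PySem.List.pyGetD_eq_getElem _ _ (by omega) (by omega)]
          try simp
        have e2 : PySem.List.pyGetD s ((s.length : Int) - 1 - (k : Nat)) ' '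
            = s[s.length - 1 - k]'(by omega) := by
          rw [PySem.List.pyGetD_eq_getElem _ _ (by omega) (by omega)]
          congr 1
          omega
        rw [decide_eq_true_iff]
        refine ⟨?_, ?_⟩
        · rw [e1, e2]; exact hm
        · rw [e1]; simpa [checkEvens] using he
    · intro hB
      rw [List.all_eq_true] at hB
      have hhc : ∀ k (hk : k < s.length / 2), s[k]'(by omega) = s[s.length - 1 - k]'(by omega)
          ∧ s[k]'(by omega) ∈ checkEvens := by
        intro k hk
        have := hB _ (List.mem_map.mpr ⟨k, List.mem_range.mpr hk, rfl⟩)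
        rw [decide_eq_true_iff] at this
        have e1 : PySem.List.pyGetD s ((k : Nat) : Int) ' ' = s[k]'(by omega) := by
          rw [PySem.List.pyGetD_eq_getElem _ _ (by omega) (by omega)]
          try simp
        have e2 : PySem.List.pyGetD s ((s.length : Int) - 1 - (k : Nat)) ' '
            = s[s.length - 1 - k]'(by omega) := by
          rw [PySem.List.pyGetD_eq_getElem _ _ (by omega) (by omega)]
          congr 1
          omega
        rw [e1, e2] at this
        exact ⟨this.1, by simpa [checkEvens] using this.2⟩
      obtain ⟨hp, hall⟩ := (half_check_iff s hev).mpr hhc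
      rw [if_pos hp.symm, List.all_eq_true]
      intro c hc
      simpa using hall c hc

-- ===== VERDICT (by name: the statement is the Claim_ definition above) =====
theorem check_spec : Claim_equal_check := by
  intro n _
  unfold Spec_check
  exact check_eq_check_alt n
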